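-- pv_equiv track=rewrite | github.com/jbkarvens/baekjoon | 백준/Platinum/18776. Xorshift32/Xorshift32.py | get_xorshift_mat
-- ===== SOURCE A (Python) =====
-- def matmul(A,B):
--     n,m,k=len(A),len(A[0]),len(B[0])
--     res = [[None for _ in range(k)] for _ in range(n)]
--     for i in range(n):
--         for j in range(k):
--             cal = 0
--             for t in range(m):
--                 cal += A[i][t]*B[t][j]
--             res[i][j] = cal&1
--     return res
--
-- def get_xorshift_mat(e):
--     N = 32
--     shift1 = [[1 if j==i-13 or i==j else 0 for j in range(N)] for i in range(N)]
--     shift2 = [[1 if j==i+17 or i==j else 0 for j in range(N)] for i in range(N)]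
--     shift3 = [[1 if j==i-5 or i==j else 0 for j in range(N)] for i in range(N)]
--     xorshift = matmul(matmul(shift3,shift2),shift1)
--     for _ in range(e):
--         xorshift = matmul(xorshift,xorshift)
--     return xorshift
-- ===== SOURCE B (Python) =====
-- def get_xorshift_mat(e):
--     N = 32
--     def bitmul(X, Y):
--         # rows packed as 32-bit ints; result row = XOR of Y-rows selected by the bits of the X-row
--         out = []
--         for r in X:
--             acc = 0
--             rr = r
--             for yr in Y:
--                 if rr & 1:
--                     acc ^= yr
--                 rr >>= 1
--             out.append(acc)
--         return out
--     def diag_pair(d):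
--         # packed matrix with ones at (i, i) and (i, i+d)
--         return [(1 << i) | ((1 << (i + d)) if 0 <= i + d < N else 0) for i in range(N)]
--     s1 = diag_pair(-13)
--     s2 = diag_pair(17)
--     s3 = diag_pair(-5)
--     m = bitmul(bitmul(s3, s2), s1)
--     for _ in range(e):
--         m = bitmul(m, m)
--     return [[(r >> j) & 1 for j in range(N)] for r in m]
-- ===== Notes on version B (the rewrite author's own statement) =====
-- stated objective: faster
-- what changed: Each zero/one row is packed into a single integer (one bit per column), so a GF(2) matrix product becomes, per row, an XOR of whole selected rows — no inner column loop and no per-cell dot product; the packed result is unpacked into the list matrix only at the end.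
import Mathlib
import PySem

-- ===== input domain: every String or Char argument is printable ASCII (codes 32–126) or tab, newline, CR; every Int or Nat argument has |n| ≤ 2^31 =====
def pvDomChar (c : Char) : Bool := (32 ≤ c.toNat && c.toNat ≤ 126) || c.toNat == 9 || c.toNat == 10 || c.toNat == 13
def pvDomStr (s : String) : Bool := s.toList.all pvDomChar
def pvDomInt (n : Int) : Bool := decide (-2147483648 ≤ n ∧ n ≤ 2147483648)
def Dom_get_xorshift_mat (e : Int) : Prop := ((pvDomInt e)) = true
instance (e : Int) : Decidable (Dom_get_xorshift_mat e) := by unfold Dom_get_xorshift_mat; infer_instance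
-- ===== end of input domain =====

-- B packs each zero/one row into a single integer and multiplies over GF(2) by XOR-ing
-- whole selected rows, replacing A's per-cell dot products (objective: faster).

-- ===== PORT A =====
-- A's matmul; all index accesses are in range in every call A makes (square 32×32
-- matrices), so List.getD is exact there; Python's `cal & 1` is PySem.Int.band cal 1.
def pvMatmulA (A B : List (List Int)) : List (List Int) :=
  let n := A.length
  let m := (A.getD 0 []).length
  let k := (B.getD 0 []).length
  (List.range n).map (fun i =>
    (List.range k).map (fun j =>
      PySem.Int.band
        ((List.range m).foldl
          (fun cal t => cal + ((A.getD i []).getD t 0) * ((B.getD t []).getD j 0)) 0) 1))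

-- `for _ in range(e): xorshift = matmul(xorshift, xorshift)` — range(e) has max(e,0) steps
def pvSqIterA (X : List (List Int)) : Nat → List (List Int)
  | 0 => X
  | n + 1 => pvSqIterA (pvMatmulA X X) n

def get_xorshift_mat (e : Int) : List (List Int) :=
  let N : Nat := 32
  let shift1 := (List.range N).map (fun (i : Nat) => (List.range N).map (fun (j : Nat) =>
    if (j : Int) = (i : Int) - 13 ∨ i = j then 1 else 0))
  let shift2 := (List.range N).map (fun (i : Nat) => (List.range N).map (fun (j : Nat) =>
    if (j : Int) = (i : Int) + 17 ∨ i = j then 1 else 0))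
  let shift3 := (List.range N).map (fun (i : Nat) => (List.range N).map (fun (j : Nat) =>
    if (j : Int) = (i : Int) - 5 ∨ i = j then 1 else 0))
  let xorshift := pvMatmulA (pvMatmulA shift3 shift2) shift1
  pvSqIterA xorshift e.toNat

-- ===== PORT B =====
-- packed rows are Python ints in [0, 2^32); Nat's &&& / ^^^ / >>> are exact for them
def pvBitmulRow (acc rr : Nat) : List Nat → Nat
  | [] => acc
  | yr :: Y => pvBitmulRow (if rr &&& 1 = 1 then acc ^^^ yr else acc) (rr >>> 1) Y

def pvBitmulB (X Y : List Nat) : List Nat := X.map (fun r => pvBitmulRow 0 r Y)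

-- diag_pair(d): packed matrix with ones at (i, i) and (i, i+d)
def pvDiagPairB (d : Int) : List Nat :=
  (List.range 32).map (fun i =>
    (1 <<< i) |||
      (if 0 ≤ (i : Int) + d ∧ (i : Int) + d < 32 then 1 <<< ((i : Int) + d).toNat else 0))

def pvSqIterB (m : List Nat) : Nat → List Nat
  | 0 => m
  | n + 1 => pvSqIterB (pvBitmulB m m) n

def get_xorshift_mat_alt (e : Int) : List (List Int) :=
  let s1 := pvDiagPairB (-13)
  let s2 := pvDiagPairB 17
  let s3 := pvDiagPairB (-5)
  let m := pvSqIterB (pvBitmulB (pvBitmulB s3 s2) s1) e.toNat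
  m.map (fun r => (List.range 32).map (fun j => (((r >>> j) &&& 1 : Nat) : Int)))

-- ===== PRECONDITION & SPEC =====
def Spec_get_xorshift_mat (e : Int) (out : List (List Int)) : Prop := out = get_xorshift_mat_alt e
instance (e : Int) (out : List (List Int)) : Decidable (Spec_get_xorshift_mat e out) := by unfold Spec_get_xorshift_mat; infer_instance

-- ===== CLAIM (what is proved, stated in full; the proofs are below) =====
def Claim_equal_get_xorshift_mat : Prop := ∀ (e : Int), Dom_get_xorshift_mat e → Spec_get_xorshift_mat e (get_xorshift_mat e)

-- ===== LEMMAS AND PROOFS =====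

/-- Every entry is a bit. -/
def pvBits (r : List Int) : Prop := ∀ a ∈ r, a = 0 ∨ a = 1

/-- 32×32 bit matrix. -/
def pvInv (M : List (List Int)) : Prop :=
  M.length = 32 ∧ ∀ row ∈ M, row.length = 32 ∧ pvBits row

/-- Pack a 0/1 row into a natural number, entry j at bit j. -/
def pvPackRow : List Int → Nat
  | [] => 0
  | a :: r => a.toNat + 2 * pvPackRow r

/-- Column-j dot product of a row against a matrix's rows. -/
def pvDotJ (j : Nat) : List Int → List (List Int) → Int
  | x :: xr, yr :: Yp => x * (yr.getD j 0) + pvDotJ j xr Yp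
  | _, _ => 0

theorem pvBits_getD {r : List Int} (h : pvBits r) (j : Nat) :
    r.getD j 0 = 0 ∨ r.getD j 0 = 1 := by
  rcases h' : r[j]? with _ | a
  · simp [List.getD, h']
  · have := List.mem_of_getElem? h'
    simpa [List.getD, h'] using h _ this


theorem pvPackRow_testBit {r : List Int} (h : pvBits r) (j : Nat) :
    (pvPackRow r).testBit j = decide (r.getD j 0 = 1) := by
  induction r generalizing j with
  | nil => simp [pvPackRow, List.getD]
  | cons a r ih =>
    have ha : a = 0 ∨ a = 1 := h a (by simp)
    have hr : pvBits r := fun x hx => h x (by simp [hx])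
    cases j with
    | zero =>
      rcases ha with rfl | rfl <;>
        simp [pvPackRow, Nat.testBit_zero, Nat.add_mul_mod_self_left, Nat.mul_mod_right]
    | succ j =>
      have hd : (pvPackRow (a :: r)) / 2 = pvPackRow r := by
        rcases ha with rfl | rfl <;> simp [pvPackRow] <;> omega
      rw [Nat.testBit_succ, hd, ih hr j]
      simp


theorem pvParity (b s : Int) (hb : b = 0 ∨ b = 1) :
    decide ((b + s) % 2 = 1) = (decide (b = 1)).xor (decide (s % 2 = 1)) := by
  rcases hb with rfl | rfl
  · simp
  · rcases Int.emod_two_eq s with h | h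
    · have h1 : (1 + s) % 2 = 1 := by omega
      simp [h1, h]
    · have h1 : (1 + s) % 2 = 0 := by omega
      simp [h1, h]


theorem pvDotJ_zero_of_ge {Yp : List (List Int)} (hY : ∀ row ∈ Yp, row.length = 32)
    {j : Nat} (hj : 32 ≤ j) (xr : List Int) : pvDotJ j xr Yp = 0 := by
  induction xr generalizing Yp with
  | nil => simp [pvDotJ]
  | cons x xr ih =>
    cases Yp with
    | nil => simp [pvDotJ]
    | cons yr Yp =>
      have h1 : yr.getD j 0 = 0 := by
        have : yr.length = 32 := hY yr (by simp)
        simp [List.getD, List.getElem?_eq_none (by omega : yr.length ≤ j)]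
      have := ih (fun row hr => hY row (List.mem_cons_of_mem _ hr))
      simp [pvDotJ, this]
      right
      simpa [List.getD] using h1


theorem pvBitmulRow_testBit (xr : List Int) (Yp : List (List Int))
    (hlen : xr.length = Yp.length) (hx : pvBits xr) (hY : ∀ row ∈ Yp, pvBits row)
    (acc : Nat) (j : Nat) :
    (pvBitmulRow acc (pvPackRow xr) (Yp.map pvPackRow)).testBit j
      = (acc.testBit j).xor (decide (pvDotJ j xr Yp % 2 = 1)) := by
  induction xr generalizing Yp acc with
  | nil =>
    cases Yp with
    | nil => simp [pvBitmulRow, pvDotJ]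
    | cons yr Yp => simp at hlen
  | cons x xr ih =>
    cases Yp with
    | nil => simp at hlen
    | cons yr Yp =>
      have hx0 : x = 0 ∨ x = 1 := hx x (by simp)
      have hxr : pvBits xr := fun a ha => hx a (by simp [ha])
      have hyr : pvBits yr := hY yr (by simp)
      have hY' : ∀ row ∈ Yp, pvBits row := fun row hr => hY row (List.mem_cons_of_mem _ hr)
      have hlen' : xr.length = Yp.length := by simpa using hlen
      have hy : yr.getD j 0 = 0 ∨ yr.getD j 0 = 1 := pvBits_getD hyr j
      have hsh : pvPackRow (x :: xr) >>> 1 = pvPackRow xr := by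
        rcases hx0 with rfl | rfl <;> simp [pvPackRow, Nat.shiftRight_one] <;> omega
      rcases hx0 with rfl | rfl
      · have hb : pvPackRow ((0 : Int) :: xr) &&& 1 = 0 := by
          simp [pvPackRow, Nat.and_one_is_mod, Nat.mul_mod_right]
        rw [List.map_cons, pvBitmulRow, hb]
        simp only [hsh]
        rw [if_neg (by omega)]
        rw [ih Yp hlen' hxr hY' acc]
        simp [pvDotJ]
      · have hb : pvPackRow ((1 : Int) :: xr) &&& 1 = 1 := by
          simp [pvPackRow, Nat.and_one_is_mod, Nat.add_mul_mod_self_left]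
        rw [List.map_cons, pvBitmulRow, hb]
        simp only [hsh]
        simp only [if_true]
        rw [ih Yp hlen' hxr hY' (acc ^^^ pvPackRow yr)]
        rw [Nat.testBit_xor, pvPackRow_testBit hyr j]
        have : pvDotJ j ((1 : Int) :: xr) (yr :: Yp) = yr.getD j 0 + pvDotJ j xr Yp := by
          simp [pvDotJ]
        rw [this, pvParity _ _ hy]
        cases acc.testBit j <;> cases (decide (yr.getD j 0 = 1)) <;>
          cases (decide (pvDotJ j xr Yp % 2 = 1)) <;> rfl


theorem pvFoldlAdd (l : List Nat) (f : Nat → Int) (a : Int) :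
    l.foldl (fun c t => c + f t) a = a + (l.map f).sum := by
  induction l generalizing a with
  | nil => simp
  | cons x l ih => simp [ih]; ring


theorem pvSumRangeDot (xr : List Int) (Yp : List (List Int)) (j : Nat)
    (hlen : xr.length = Yp.length) :
    ((List.range xr.length).map
        (fun t => xr.getD t 0 * ((Yp.getD t []).getD j 0))).sum = pvDotJ j xr Yp := by
  induction xr generalizing Yp with
  | nil => simp [pvDotJ]
  | cons x xr ih =>
    cases Yp with
    | nil => simp at hlen
    | cons yr Yp =>
      have hlen' : xr.length = Yp.length := by simpa using hlen
      rw [List.length_cons, List.range_succ_eq_map, List.map_cons, List.map_map]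
      simp only [List.sum_cons]
      simp only [List.sum_cons, Function.comp_def, List.getD_cons_succ, List.getD_cons_zero]
      rw [ih Yp hlen']
      simp [pvDotJ]


theorem pvMapRangeGetD {α β : Type} (l : List α) (d : α) (g : α → β) :
    (List.range l.length).map (fun i => g (l.getD i d)) = l.map g := by
  induction l with
  | nil => simp
  | cons x l ih =>
    rw [List.length_cons, List.range_succ_eq_map, List.map_cons, List.map_map]
    simp only [List.getD_cons_zero, Function.comp_def, List.getD_cons_succ, List.map_cons]
    rw [ih]


theorem pvGetD_map_range {β : Type} (n j : Nat) (g : Nat → β) (d : β) (hj : j < n) :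
    ((List.range n).map g).getD j d = g j := by
  simp [List.getD, List.getElem?_map, List.getElem?_range, hj]


/-- A's matmul in canonical form on 32×32 bit matrices. -/
theorem pvMatmulA_eq {X Y : List (List Int)} (hX : pvInv X) (hY : pvInv Y) :
    pvMatmulA X Y = X.map (fun xr => (List.range 32).map (fun j => pvDotJ j xr Y % 2)) := by
  obtain ⟨hlX, hrX⟩ := hX
  obtain ⟨hlY, hrY⟩ := hY
  have hX0 : (X.getD 0 []).length = 32 := by
    cases X with
    | nil => simp at hlX
    | cons r X => exact (hrX r (by simp)).1
  have hY0 : (Y.getD 0 []).length = 32 := by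
    cases Y with
    | nil => simp at hlY
    | cons r Y => exact (hrY r (by simp)).1
  unfold pvMatmulA
  simp only [hX0, hY0]
  rw [pvMapRangeGetD X ([] : List Int)
    (fun xr => (List.range 32).map (fun j => PySem.Int.band
      ((List.range 32).foldl (fun cal t => cal + xr.getD t 0 * ((Y.getD t []).getD j 0)) 0) 1))]
  apply List.map_congr_left
  intro xr hxr
  apply List.map_congr_left
  intro j _
  have hxl : xr.length = 32 := (hrX xr hxr).1
  have hfold : (List.range 32).foldl
      (fun cal t => cal + xr.getD t 0 * ((Y.getD t []).getD j 0)) 0 = pvDotJ j xr Y := by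
    rw [← hxl, pvFoldlAdd, pvSumRangeDot xr Y j (by omega)]
    simp
  rw [hfold, PySem.Int.band_one, PySem.Int.mod_eq_emod_of_pos (by omega)]


theorem pvInv_matmul {X Y : List (List Int)} (hX : pvInv X) (hY : pvInv Y) :
    pvInv (pvMatmulA X Y) := by
  rw [pvMatmulA_eq hX hY]
  constructor
  · simpa using hX.1
  · intro row hrow
    obtain ⟨xr, _, rfl⟩ := List.mem_map.mp hrow
    refine ⟨by simp, ?_⟩
    intro a ha
    obtain ⟨j, _, rfl⟩ := List.mem_map.mp ha
    have := Int.emod_two_eq (pvDotJ j xr Y)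
    omega


theorem pvPack_matmul {X Y : List (List Int)} (hX : pvInv X) (hY : pvInv Y) :
    (pvMatmulA X Y).map pvPackRow = pvBitmulB (X.map pvPackRow) (Y.map pvPackRow) := by
  have hYlen : ∀ row ∈ Y, row.length = 32 := fun row hr => (hY.2 row hr).1
  have hYbits : ∀ row ∈ Y, pvBits row := fun row hr => (hY.2 row hr).2
  rw [pvMatmulA_eq hX hY]
  unfold pvBitmulB
  rw [List.map_map, List.map_map]
  apply List.map_congr_left
  intro xr hxr
  simp only [Function.comp_def]
  have hxl : xr.length = 32 := (hX.2 xr hxr).1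
  have hxb : pvBits xr := (hX.2 xr hxr).2
  have hrowbits : pvBits ((List.range 32).map (fun j => pvDotJ j xr Y % 2)) := by
    intro a ha
    obtain ⟨j, _, rfl⟩ := List.mem_map.mp ha
    have := Int.emod_two_eq (pvDotJ j xr Y)
    omega
  apply Nat.eq_of_testBit_eq
  intro j
  rw [pvPackRow_testBit hrowbits j,
    pvBitmulRow_testBit xr Y (by rw [hxl, hY.1]) hxb hYbits 0 j]
  simp only [Nat.zero_testBit, Bool.false_xor]
  by_cases hj : j < 32
  · rw [pvGetD_map_range 32 j _ 0 hj]
  · have h0 : pvDotJ j xr Y = 0 := pvDotJ_zero_of_ge hYlen (by omega) xr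
    have hg : ((List.range 32).map (fun j => pvDotJ j xr Y % 2)).getD j 0 = 0 := by
      have hl : ((List.range 32).map (fun j => pvDotJ j xr Y % 2)).length ≤ j := by
        simp; omega
      simp [List.getD, List.getElem?_eq_none hl]
    rw [h0, hg]
    decide


theorem pvSqIter_corr (n : Nat) (X : List (List Int)) (hX : pvInv X) :
    pvSqIterB (X.map pvPackRow) n = (pvSqIterA X n).map pvPackRow ∧ pvInv (pvSqIterA X n) := by
  induction n generalizing X with
  | zero => exact ⟨rfl, hX⟩
  | succ n ih =>
    have h1 := pvInv_matmul hX hX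
    have h2 := pvPack_matmul hX hX
    have := ih (pvMatmulA X X) h1
    exact ⟨by rw [pvSqIterB, ← h2, this.1]; rfl, this.2⟩


theorem pvUnpack {X : List (List Int)} (hX : pvInv X) :
    (X.map pvPackRow).map (fun r => (List.range 32).map (fun j => (((r >>> j) &&& 1 : Nat) : Int))) = X := by
  have hbit : ∀ (p j : Nat), (p >>> j) &&& 1 = if p.testBit j then 1 else 0 := by
    intro p j
    induction j generalizing p with
    | zero =>
      rw [Nat.shiftRight_zero, Nat.and_one_is_mod, Nat.testBit_zero]
      rcases Nat.mod_two_eq_zero_or_one p with h | h <;> simp [h]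
    | succ j ih =>
      have hs : p >>> (j + 1) = (p / 2) >>> j := by
        rw [Nat.shiftRight_eq_div_pow, Nat.shiftRight_eq_div_pow,
          Nat.div_div_eq_div_mul, pow_succ]
        ring_nf
      rw [hs, ih, Nat.testBit_succ]
  rw [List.map_map]
  conv_rhs => rw [← List.map_id X]
  apply List.map_congr_left
  intro row hrow
  simp only [Function.comp_def, id]
  have hlen : row.length = 32 := (hX.2 row hrow).1
  have hbits : pvBits row := (hX.2 row hrow).2
  have hent : ∀ j : Nat, (((pvPackRow row >>> j) &&& 1 : Nat) : Int) = row.getD j 0 := by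
    intro j
    rw [hbit, pvPackRow_testBit hbits j]
    rcases pvBits_getD hbits j with h | h <;> simp only [List.getD] at h <;> simp [List.getD, h]
  calc (List.range 32).map (fun j => (((pvPackRow row >>> j) &&& 1 : Nat) : Int))
      = (List.range 32).map (fun j => row.getD j 0) := by
        apply List.map_congr_left; intro j _; exact hent j
    _ = row := by
        rw [← hlen]
        simpa using pvMapRangeGetD row (0 : Int) id


theorem pvShift1_inv : pvInv ((List.range 32).map (fun (i : Nat) => (List.range 32).map (fun (j : Nat) =>
    if (j : Int) = (i : Int) - 13 ∨ i = j then 1 else 0))) := by unfold pvInv pvBits; decide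

theorem pvShift2_inv : pvInv ((List.range 32).map (fun (i : Nat) => (List.range 32).map (fun (j : Nat) =>
    if (j : Int) = (i : Int) + 17 ∨ i = j then 1 else 0))) := by unfold pvInv pvBits; decide

theorem pvShift3_inv : pvInv ((List.range 32).map (fun (i : Nat) => (List.range 32).map (fun (j : Nat) =>
    if (j : Int) = (i : Int) - 5 ∨ i = j then 1 else 0))) := by unfold pvInv pvBits; decide

theorem pvPack_shift1 : ((List.range 32).map (fun (i : Nat) => (List.range 32).map (fun (j : Nat) =>
    if (j : Int) = (i : Int) - 13 ∨ i = j then 1 else 0))).map pvPackRow = pvDiagPairB (-13) := by decide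

theorem pvPack_shift2 : ((List.range 32).map (fun (i : Nat) => (List.range 32).map (fun (j : Nat) =>
    if (j : Int) = (i : Int) + 17 ∨ i = j then 1 else 0))).map pvPackRow = pvDiagPairB 17 := by decide

theorem pvPack_shift3 : ((List.range 32).map (fun (i : Nat) => (List.range 32).map (fun (j : Nat) =>
    if (j : Int) = (i : Int) - 5 ∨ i = j then 1 else 0))).map pvPackRow = pvDiagPairB (-5) := by decide

-- ===== VERDICT (by name: the statement is the Claim_ definition above) =====
theorem get_xorshift_mat_spec : Claim_equal_get_xorshift_mat := by
  intro e _
  show get_xorshift_mat e = get_xorshift_mat_alt e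
  simp only [get_xorshift_mat, get_xorshift_mat_alt]
  have hm1 := pvInv_matmul pvShift3_inv pvShift2_inv
  have hinv0 := pvInv_matmul hm1 pvShift1_inv
  obtain ⟨hB, hInv⟩ := pvSqIter_corr e.toNat _ hinv0
  rw [← pvPack_shift3, ← pvPack_shift2, ← pvPack_shift1,
    ← pvPack_matmul pvShift3_inv pvShift2_inv, ← pvPack_matmul hm1 pvShift1_inv,
    hB, pvUnpack hInv]
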